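-- pv_equiv track=rewrite | github.com/mtgraves/resume | src/templates/altacv/__init__.py | build_strength_group
-- ===== SOURCE A (Python) =====
-- def build_strength_group(strength_vals:dict, line_char_max:int):
--     '''builds a strength group, ensuring
--     that the tags are wrapped based on some (rudimentary)
--     length limit to avoid horizontal overflow.
--     '''
--     resume_str = r''
--     line_char_count = 0
--     # iterate the kvps inside of this particular
--     for exp_i_count, exp_i in enumerate(strength_vals.values()):
--         line_char_count += len(exp_i['skill'])
--         # if we are under the limit with our new tag, we add it
--         # to the list and continue.
--         if line_char_count < line_char_max:
--             resume_str += r'\cvtag{'+str(exp_i['skill'])+r'}'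
--         # otherwise, we add a new line then add the tag,
--         # then reset the line character count to that of the current
--         # tags length.
--         else:
--             # we do not add a line break for the first element
--             if exp_i_count != 0:
--                 resume_str += r'\\'
--             resume_str += r'\cvtag{'+str(exp_i['skill'])+r'}'
--             line_char_count = len(exp_i['skill'])
--
--     # ensure we have a line break between strength types
--     resume_str += r'\\'
--
--     return resume_str
-- ===== SOURCE B (Python) =====
-- def build_strength_group(strength_vals: dict, line_char_max: int):
--     '''Recursive maximal-prefix splitter: peel one full line off the skill
--     list at a time, then join the rendered lines.'''
--     def lines_of(skills):
--         if not skills: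
--             return []
--         i, total = 1, len(skills[0])
--         while i < len(skills) and total + len(skills[i]) < line_char_max:
--             total += len(skills[i])
--             i += 1
--         head = ''.join(r'\cvtag{' + str(s) + r'}' for s in skills[:i])
--         return [head] + lines_of(skills[i:])
--     skills = [v['skill'] for v in strength_vals.values()]
--     return r'\\'.join(lines_of(skills)) + r'\\'
-- ===== Notes on version B (the rewrite author's own statement) =====
-- stated objective: alternative
-- what changed: B replaces A's single stateful loop (enumerate counter, running line count carried across lines, inline string concatenation) by a recursive maximal-prefix splitter: lines_of peels the longest fitting prefix of the skill list off as one rendered line and recurses on the remainder, and the lines are joined at the end; the first-element special case disappears structurally.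
import Mathlib
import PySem

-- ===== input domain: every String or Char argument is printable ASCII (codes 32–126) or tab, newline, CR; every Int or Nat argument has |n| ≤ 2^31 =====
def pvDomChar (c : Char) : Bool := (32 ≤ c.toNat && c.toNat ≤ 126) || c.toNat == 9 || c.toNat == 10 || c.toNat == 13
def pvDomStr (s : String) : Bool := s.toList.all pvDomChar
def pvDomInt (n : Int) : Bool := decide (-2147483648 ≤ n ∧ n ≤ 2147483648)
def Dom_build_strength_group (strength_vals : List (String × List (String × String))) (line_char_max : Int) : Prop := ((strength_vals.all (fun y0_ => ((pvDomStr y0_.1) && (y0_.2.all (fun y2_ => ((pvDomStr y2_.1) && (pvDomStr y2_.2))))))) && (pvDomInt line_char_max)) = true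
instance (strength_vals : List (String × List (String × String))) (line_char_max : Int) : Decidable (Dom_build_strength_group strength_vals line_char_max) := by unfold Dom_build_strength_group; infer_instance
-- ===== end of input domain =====

-- B replaces A's single stateful loop by a recursive maximal-prefix line splitter
-- (objective: alternative decomposition, same cost).

-- ===== PORT A =====
-- one loop step of A: state = (resume_str, line_char_count, exp_i_count)
def bsgStepA (line_char_max : Int) (st : String × Int × Nat) (exp_i : List (String × String)) :
    String × Int × Nat :=
  match (PySem.Dict.ofList exp_i).get? "skill" with
  | none => (st.1, st.2.1, st.2.2 + 1)   -- Python raises KeyError here; excluded by Pre_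
  | some skill =>
    let c := st.2.1 + PySem.Str.len skill
    if c < line_char_max then
      (st.1 ++ ("\\cvtag{" ++ skill ++ "}"), c, st.2.2 + 1)
    else
      ((if st.2.2 ≠ 0 then st.1 ++ "\\\\" else st.1) ++ ("\\cvtag{" ++ skill ++ "}"),
        PySem.Str.len skill, st.2.2 + 1)

def build_strength_group (strength_vals : List (String × List (String × String))) (line_char_max : Int) : String :=
  let st := ((PySem.Dict.ofList strength_vals).values).foldl (bsgStepA line_char_max) ("", 0, 0)
  st.1 ++ "\\\\"

-- ===== PORT B =====
def bsgTag (s : String) : String := "\\cvtag{" ++ s ++ "}"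

-- the while loop of lines_of: how many further skills stay on the current line
def bsgTake (m : Int) (total : Int) : List String → Nat
  | [] => 0
  | s :: t => if total + PySem.Str.len s < m then bsgTake m (total + PySem.Str.len s) t + 1 else 0

-- lines_of: peel the maximal fitting prefix off as one rendered line, recurse on the rest
def bsgLines (m : Int) : List String → List String
  | [] => []
  | s :: t =>
    let k := bsgTake m (PySem.Str.len s) t
    PySem.Str.join "" ((s :: t.take k).map bsgTag) :: bsgLines m (t.drop k)
termination_by l => l.length
decreasing_by simp

-- [v['skill'] for v in strength_vals.values()]; a missing key raises KeyError in Python,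
-- excluded by Pre_ (getD "" is never the value used under Pre_)
def bsgSkills (strength_vals : List (String × List (String × String))) : List String :=
  ((PySem.Dict.ofList strength_vals).values).map (fun d => ((PySem.Dict.ofList d).get? "skill").getD "")

def build_strength_group_alt (strength_vals : List (String × List (String × String))) (line_char_max : Int) : String :=
  PySem.Str.join "\\\\" (bsgLines line_char_max (bsgSkills strength_vals)) ++ "\\\\"

-- ===== PRECONDITION & SPEC =====
-- Pre_ excludes exactly the inputs where some iterated value lacks the key 'skill',
-- on which the Python A raises KeyError.
def Pre_build_strength_group (strength_vals : List (String × List (String × String))) (line_char_max : Int) : Prop :=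
  ∀ d ∈ (PySem.Dict.ofList strength_vals).values, ((PySem.Dict.ofList d).get? "skill").isSome = true
instance (strength_vals : List (String × List (String × String))) (line_char_max : Int) : Decidable (Pre_build_strength_group strength_vals line_char_max) := by unfold Pre_build_strength_group; infer_instance

def pvWitness_build_strength_group : (List (String × List (String × String))) × Int :=
  ([("a", [("skill", "Python")]), ("b", [("skill", "Lean")])], 9)

def Spec_build_strength_group (strength_vals : List (String × List (String × String))) (line_char_max : Int) (out : String) : Prop := out = build_strength_group_alt strength_vals line_char_max
instance (strength_vals : List (String × List (String × String))) (line_char_max : Int) (out : String) : Decidable (Spec_build_strength_group strength_vals line_char_max out) := by unfold Spec_build_strength_group; infer_instance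

-- ===== CLAIM =====
def Claim_equal_build_strength_group : Prop := ∀ (strength_vals : List (String × List (String × String))) (line_char_max : Int), Dom_build_strength_group strength_vals line_char_max → Pre_build_strength_group strength_vals line_char_max → Spec_build_strength_group strength_vals line_char_max (build_strength_group strength_vals line_char_max)

-- ===== LEMMAS AND PROOFS =====

-- the rendered continuation of A's loop from a mid-line state with current line total cnt
def bsgCont (m : Int) (cnt : Int) : List String → String
  | [] => ""
  | s :: t =>
    if cnt + PySem.Str.len s < m then bsgTag s ++ bsgCont m (cnt + PySem.Str.len s) t
    else "\\\\" ++ (bsgTag s ++ bsgCont m (PySem.Str.len s) t)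

def bsgRest (m : Int) : List String → String
  | [] => ""
  | s :: t => "\\\\" ++ (bsgTag s ++ bsgCont m (PySem.Str.len s) t)

theorem bsg_join_cons (sep a : String) (rest : List String) (h : rest ≠ []) :
    PySem.Str.join sep (a :: rest) = a ++ sep ++ PySem.Str.join sep rest := by
  cases rest with
  | nil => exact absurd rfl h
  | cons b t => simp [PySem.Str.join, PySem.Chars.join_cons_cons, String.append_assoc]

theorem bsg_join_empty_cons (a : String) (l : List String) :
    PySem.Str.join "" (a :: l) = a ++ PySem.Str.join "" l := by
  cases l with
  | nil => simp [PySem.Str.join, PySem.Chars.join, List.intercalate]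
  | cons b t => rw [bsg_join_cons "" a (b :: t) (by simp)]; simp

-- A's loop from any mid-line state renders str ++ bsgCont of the remaining skills
theorem bsg_A_loop (m : Int) :
    ∀ (vals : List (List (String × String))),
      (∀ d ∈ vals, ((PySem.Dict.ofList d).get? "skill").isSome = true) →
      ∀ (str : String) (cnt : Int) (i : Nat), i ≠ 0 →
      (vals.foldl (bsgStepA m) (str, cnt, i)).1
        = str ++ bsgCont m cnt (vals.map (fun d => ((PySem.Dict.ofList d).get? "skill").getD "")) := by
  intro vals
  induction vals with
  | nil => intro _ str cnt i _; simp [bsgCont]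
  | cons v rest ih =>
      intro hsk str cnt i hi
      obtain ⟨s, hs⟩ := Option.isSome_iff_exists.mp (hsk v (by simp))
      rw [List.foldl_cons]
      simp only [List.map_cons, hs, Option.getD_some]
      by_cases hlt : cnt + (s.length : Int) < m
      · rw [show bsgStepA m (str, cnt, i) v = (str ++ bsgTag s, cnt + PySem.Str.len s, i + 1) by
            simp [bsgStepA, hs, hlt, bsgTag]]
        rw [ih (fun d hd => hsk d (by simp [hd])) _ _ (i + 1) (by omega)]
        simp [bsgCont, hlt, String.append_assoc]
      · rw [show bsgStepA m (str, cnt, i) v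
              = ((str ++ "\\\\") ++ bsgTag s, PySem.Str.len s, i + 1) by
            simp [bsgStepA, hs, hlt, hi, bsgTag]]
        rw [ih (fun d hd => hsk d (by simp [hd])) _ _ (i + 1) (by omega)]
        simp [bsgCont, hlt, String.append_assoc]

theorem bsg_join_singleton (sep a : String) : PySem.Str.join sep [a] = a := by
  simp [PySem.Str.join, PySem.Chars.join, List.intercalate]

-- bsgCont splits at the first line break computed by bsgTake
theorem bsg_cont_split (m : Int) :
    ∀ (t : List String) (total : Int),
      bsgCont m total t
        = PySem.Str.join "" ((t.take (bsgTake m total t)).map bsgTag)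
            ++ bsgRest m (t.drop (bsgTake m total t)) := by
  intro t
  induction t with
  | nil => intro total; simp [bsgCont, bsgTake, bsgRest, PySem.Str.join, PySem.Chars.join, List.intercalate]
  | cons s t' ih =>
      intro total
      by_cases hlt : total + (s.length : Int) < m
      · have hk : bsgTake m total (s :: t') = bsgTake m (total + PySem.Str.len s) t' + 1 := by
          simp [bsgTake, hlt]
        rw [hk]
        simp only [bsgCont, List.take_succ_cons, List.drop_succ_cons, List.map_cons]
        rw [if_pos (by simpa using hlt), ih (total + PySem.Str.len s), bsg_join_empty_cons,
          String.append_assoc]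
      · have hk : bsgTake m total (s :: t') = 0 := by simp [bsgTake, hlt]
        rw [hk]
        simp only [bsgCont, List.take_zero, List.drop_zero, List.map_nil, bsgRest]
        rw [if_neg (by simpa using hlt)]
        simp [PySem.Str.join, PySem.Chars.join, List.intercalate]

-- the join of B's lines equals the first tag followed by A's continuation
theorem bsg_lines_join (m : Int) :
    ∀ (n : Nat) (s : String) (t : List String), (s :: t).length ≤ n →
      PySem.Str.join "\\\\" (bsgLines m (s :: t)) = bsgTag s ++ bsgCont m (PySem.Str.len s) t := by
  intro n
  induction n with
  | zero => intro s t h; simp at h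
  | succ n ih =>
      intro s t h
      simp only [bsgLines]
      rw [bsg_cont_split m t (PySem.Str.len s)]
      cases hd : t.drop (bsgTake m (PySem.Str.len s) t) with
      | nil =>
          simp only [bsgLines]
          simp only [List.map_cons]
          rw [bsg_join_singleton, bsg_join_empty_cons, bsgRest]
          simp
      | cons s' t' =>
          have hlen : (s' :: t').length ≤ n := by
            have h2 := congrArg List.length hd
            simp only [List.length_drop] at h2
            simp only [List.length_cons] at h h2 ⊢
            omega
          rw [bsg_join_cons _ _ _ (by simp only [bsgLines]; simp),
            ih s' t' hlen]
          simp only [List.map_cons]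
          rw [bsg_join_empty_cons, bsgRest]
          simp [String.append_assoc]

theorem build_strength_group_spec : Claim_equal_build_strength_group := by
  intro sv m _ hpre
  unfold Spec_build_strength_group build_strength_group build_strength_group_alt bsgSkills
  unfold Pre_build_strength_group at hpre
  cases hv : (PySem.Dict.ofList sv).values with
  | nil => simp only [List.foldl_nil, List.map_nil, bsgLines]; decide
  | cons d rest =>
      rw [hv] at hpre
      obtain ⟨s, hs⟩ := Option.isSome_iff_exists.mp (hpre d (by simp))
      have h1 : bsgStepA m ("", 0, 0) d = (bsgTag s, PySem.Str.len s, 1) := by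
        simp [bsgStepA, hs, bsgTag]
      show (List.foldl (bsgStepA m) ("", 0, 0) (d :: rest)).1 ++ "\\\\"
          = PySem.Str.join "\\\\"
              (bsgLines m (List.map (fun d => ((PySem.Dict.ofList d).get? "skill").getD "") (d :: rest)))
            ++ "\\\\"
      rw [List.foldl_cons, h1,
        bsg_A_loop m rest (fun d' hd' => hpre d' (by simp [hd'])) (bsgTag s) (PySem.Str.len s) 1
          (by omega)]
      simp only [List.map_cons, hs, Option.getD_some]
      rw [bsg_lines_join m
        (s :: rest.map (fun d => ((PySem.Dict.ofList d).get? "skill").getD "")).length _ _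
        (le_refl _)]
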